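-- pv_equiv track=rewrite | github.com/megaNursap/AppenAtPy | adap/support/report_system/find_test_duplicates.py | find_duplicates_by_name
-- ===== SOURCE A (Python) =====
-- def find_duplicates_by_name(data):
--     all_tests = {}
--
--     for test in data:
--         test_data = test.split("::")
--         test_name = test_data[1]
--         test_path = test_data[0]
--
--         if all_tests.get(test_name, None):
--             _ = all_tests[test_name]
--             _.append(test_path)
--             all_tests[test_name] = _
--         else:
--             all_tests[test_name] = [test_path]
--
--     duplicates = {}
--     for key, value in all_tests.items():
--         if len(value) > 1:
--             duplicates[key] = value
--
--     return duplicates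
-- ===== SOURCE B (Python) =====
-- def find_duplicates_by_name(data):
--     # Pass 1: split each entry once, remember (name, path) and count occurrences of each name.
--     pairs = []
--     counts = {}
--     for test in data:
--         parts = test.split("::")
--         name, path = parts[1], parts[0]
--         pairs.append((name, path))
--         counts[name] = counts.get(name, 0) + 1
--     # Pass 2: collect paths only for names seen more than once; unique names never get a list.
--     duplicates = {}
--     for name, path in pairs:
--         if counts[name] > 1:
--             duplicates.setdefault(name, []).append(path)
--     return duplicates
-- ===== Notes on version B (the rewrite author's own statement) =====
-- stated objective: alternative
-- what changed: B replaces A's group-everything-then-filter strategy (a dict of path lists for every name, scanned again to keep the long ones) by a count-then-collect strategy: one pass splits each entry once and counts names, a second pass appends a path only when its name's count exceeds 1, so lists are only ever built for duplicated names.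
import Mathlib
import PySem

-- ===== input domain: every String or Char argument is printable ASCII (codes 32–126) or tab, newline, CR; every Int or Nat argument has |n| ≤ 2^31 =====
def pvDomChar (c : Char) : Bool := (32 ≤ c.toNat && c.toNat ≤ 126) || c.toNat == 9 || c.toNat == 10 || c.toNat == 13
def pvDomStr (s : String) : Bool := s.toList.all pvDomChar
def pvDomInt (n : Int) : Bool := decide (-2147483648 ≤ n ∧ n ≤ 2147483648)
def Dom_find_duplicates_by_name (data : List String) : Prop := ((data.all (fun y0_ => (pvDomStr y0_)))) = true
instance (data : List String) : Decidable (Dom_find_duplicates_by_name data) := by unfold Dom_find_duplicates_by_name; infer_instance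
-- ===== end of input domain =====

-- B groups by counting names first and collecting paths only for duplicated names (two passes),
-- instead of A's build-all-groups-then-filter; equivalence of the returned dict (as an ordered
-- association list) is proved on inputs whose every entry contains "::" (elsewhere both raise).

-- ===== PORT A =====
def find_duplicates_by_name (data : List String) : List (String × List String) :=
  let all_tests : PySem.Dict String (List String) := data.foldl (fun d test =>
    let test_data := ((PySem.Str.split? test "::").getD [])
    let test_name := PySem.List.pyGetD test_data 1 ""   -- total guard; Pre_ puts the index in range
    let test_path := PySem.List.pyGetD test_data 0 ""
    match d.get? test_name with
    | some v => if v.isEmpty then d.insert test_name [test_path]   -- get(...) truthiness: empty list is falsy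
                else d.insert test_name (v ++ [test_path])
    | none => d.insert test_name [test_path]) PySem.Dict.empty
  let duplicates : PySem.Dict String (List String) := all_tests.items.foldl (fun acc kv =>
    if kv.2.length > 1 then acc.insert kv.1 kv.2 else acc) PySem.Dict.empty
  duplicates.items

-- ===== PORT B =====
def find_duplicates_by_name_alt (data : List String) : List (String × List String) :=
  let step := data.foldl (fun (st : List (String × String) × PySem.Dict String Int) test =>
    let parts := ((PySem.Str.split? test "::").getD [])
    let name := PySem.List.pyGetD parts 1 ""   -- total guard; Pre_ puts the index in range
    let path := PySem.List.pyGetD parts 0 ""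
    (st.1 ++ [(name, path)], st.2.insert name (st.2.getD name 0 + 1))) ([], PySem.Dict.empty)
  let pairs := step.1
  let counts := step.2
  let duplicates : PySem.Dict String (List String) := pairs.foldl (fun r p =>
    if counts.getD p.1 0 > 1 then r.modify p.1 [] (· ++ [p.2]) else r) PySem.Dict.empty
  duplicates.items

-- ===== PRECONDITION & SPEC =====
-- Pre_ excludes exactly the entries without "::": there test.split("::")[1] raises IndexError in A (and in B).
def Pre_find_duplicates_by_name (data : List String) : Prop :=
  ∀ t ∈ data, 2 ≤ (((PySem.Str.split? t "::").getD [])).length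
instance (data : List String) : Decidable (Pre_find_duplicates_by_name data) := by
  unfold Pre_find_duplicates_by_name; infer_instance
def pvWitness_find_duplicates_by_name : List String := ["a.py::t1", "b.py::t1", "c.py::t2"]

def Spec_find_duplicates_by_name (data : List String) (out : List (String × List String)) : Prop := out = find_duplicates_by_name_alt data
instance (data : List String) (out : List (String × List String)) : Decidable (Spec_find_duplicates_by_name data out) := by unfold Spec_find_duplicates_by_name; infer_instance

-- ===== CLAIM (what is proved, stated in full; the proofs are below) =====
def Claim_equal_find_duplicates_by_name : Prop := ∀ (data : List String), Dom_find_duplicates_by_name data → Pre_find_duplicates_by_name data → Spec_find_duplicates_by_name data (find_duplicates_by_name data)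

-- ===== LEMMAS AND PROOFS =====

-- the (name, path) pair an entry contributes
def pvPair (t : String) : String × String :=
  (PySem.List.pyGetD (((PySem.Str.split? t "::").getD [])) 1 "",
   PySem.List.pyGetD (((PySem.Str.split? t "::").getD [])) 0 "")

-- the grouping step both programs reduce to: append the path to the name's bucket
def pvGStep (d : PySem.Dict String (List String)) (p : String × String) : PySem.Dict String (List String) :=
  d.modify p.1 [] (· ++ [p.2])

-- A's loop body is exactly the grouping step (the empty-bucket branch of A's truthiness test agrees)
theorem pvStepA_eq (d : PySem.Dict String (List String)) (t : String) :
    (match d.get? (pvPair t).1 with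
     | some v => if v.isEmpty then d.insert (pvPair t).1 [(pvPair t).2]
                 else d.insert (pvPair t).1 (v ++ [(pvPair t).2])
     | none => d.insert (pvPair t).1 [(pvPair t).2]) = pvGStep d (pvPair t) := by
  have hmod : pvGStep d (pvPair t)
      = d.insert (pvPair t).1 (d.getD (pvPair t).1 [] ++ [(pvPair t).2]) := rfl
  rw [hmod]
  cases h : d.get? (pvPair t).1 with
  | none => rw [PySem.Dict.getD_of_get?_eq_none d _ h]; simp
  | some v =>
    rw [PySem.Dict.getD_of_get?_eq_some d _ h]
    cases v <;> simp

-- the grouping dict of a list of (name, path) pairs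
def pvG (ps : List (String × String)) : PySem.Dict String (List String) :=
  ps.foldl pvGStep PySem.Dict.empty

theorem pvG_keys (ps : List (String × String)) :
    (pvG ps).keys = PySem.Set.ofList (ps.map (fun p => p.1)) := by
  have h := PySem.Dict.keys_foldl_modify_key ps (fun p => p.1) ([] : List String)
      (fun _ p => (· ++ [p.2])) PySem.Dict.empty
  simpa [pvG, pvGStep, PySem.Set.ofList_eq_foldl, PySem.Set.update] using h

theorem pvG_nodup_keys (ps : List (String × String)) : (pvG ps).keys.Nodup :=
  PySem.Dict.nodup_keys_foldl_modify_key ps (fun p => p.1) ([] : List String)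
      (fun _ p => (· ++ [p.2])) PySem.Dict.empty PySem.Dict.nodup_keys_empty

theorem pvG_getD (ps : List (String × String)) (c : String) :
    (pvG ps).getD c [] = (ps.filter (fun p => p.1 == c)).map (fun p => p.2) := by
  have h := PySem.Dict.getD_foldl_modify_append ps PySem.Dict.empty c
  simpa [pvG, pvGStep] using h

-- A's second loop: inserting the selected items of a nodup-keyed list into a fresh dict just filters
theorem pvItemsFilterFold (l : List (String × List String)) :
    ∀ d : PySem.Dict String (List String),
    (∀ p ∈ l, d.contains p.1 = false) → (l.map (fun p => p.1)).Nodup →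
    (l.foldl (fun acc kv => if kv.2.length > 1 then acc.insert kv.1 kv.2 else acc) d).items
      = d.items ++ l.filter (fun kv => decide (kv.2.length > 1)) := by
  induction l with
  | nil => intro d _ _; simp
  | cons kv rest ih =>
    intro d hfresh hnd
    have hkv : d.contains kv.1 = false := hfresh kv List.mem_cons_self
    rw [List.map_cons] at hnd
    have hcons := List.nodup_cons.mp hnd
    simp only [List.foldl_cons, List.filter_cons]
    by_cases hp : kv.2.length > 1
    · have hfresh' : ∀ p ∈ rest, (d.insert kv.1 kv.2).contains p.1 = false := by
        intro p hpmem
        rw [PySem.Dict.contains_insert]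
        have h1 : (p.1 == kv.1) = false := by
          simp only [beq_eq_false_iff_ne, ne_eq]
          intro hEq; exact hcons.1 (hEq ▸ List.mem_map_of_mem hpmem)
        rw [h1, hfresh p (List.mem_cons_of_mem _ hpmem)]; rfl
      rw [if_pos hp, ih (d.insert kv.1 kv.2) hfresh' hcons.2,
          PySem.Dict.items_insert_of_not_contains d kv.2 hkv]
      simp [hp]
    · rw [if_neg hp, ih d (fun p hpm => hfresh p (List.mem_cons_of_mem _ hpm)) hcons.2]
      simp [hp]

-- first-occurrence dedup commutes with filtering
theorem pvAddFilter (p : String → Bool) (l : List String) :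
    ∀ s : List String,
    (l.filter p).foldl PySem.Set.add (s.filter p) = (l.foldl PySem.Set.add s).filter p := by
  induction l with
  | nil => intro s; simp
  | cons x rest ih =>
    intro s
    by_cases hx : p x
    · rw [List.filter_cons_of_pos hx]
      simp only [List.foldl_cons]
      have key : PySem.Set.add (List.filter p s) x = List.filter p (PySem.Set.add s x) := by
        by_cases hmem : x ∈ s
        · rw [PySem.Set.add_of_mem hmem, PySem.Set.add_of_mem (List.mem_filter.mpr ⟨hmem, hx⟩)]
        · rw [PySem.Set.add_of_not_mem hmem,
              PySem.Set.add_of_not_mem (fun hc => hmem (List.mem_filter.mp hc).1),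
              List.filter_append]
          simp [hx]
      rw [key]; exact ih _
    · rw [List.filter_cons_of_neg (by simp [hx])]
      simp only [List.foldl_cons]
      have key : List.filter p s = List.filter p (PySem.Set.add s x) := by
        by_cases hmem : x ∈ s
        · rw [PySem.Set.add_of_mem hmem]
        · rw [PySem.Set.add_of_not_mem hmem, List.filter_append]; simp [hx]
      rw [key]; exact ih _

theorem pvOfListFilter (p : String → Bool) (l : List String) :
    PySem.Set.ofList (l.filter p) = (PySem.Set.ofList l).filter p := by
  rw [PySem.Set.ofList_eq_foldl, PySem.Set.ofList_eq_foldl]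
  simpa using pvAddFilter p l []

-- grouping the pairs whose name satisfies Q = grouping everything, then keeping Q-named items
theorem pvGroupFilter (ps : List (String × String)) (Q : String → Bool) :
    (pvG (ps.filter (fun p => Q p.1))).items = (pvG ps).items.filter (fun kv => Q kv.1) := by
  rw [PySem.Dict.items_eq_map_keys _ (pvG_nodup_keys _) ([] : List String),
      PySem.Dict.items_eq_map_keys _ (pvG_nodup_keys ps) ([] : List String)]
  have hkeys : (pvG (ps.filter (fun p => Q p.1))).keys = (pvG ps).keys.filter Q := by
    rw [pvG_keys, pvG_keys, ← pvOfListFilter]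
    congr 1
    rw [List.filter_map]
    rfl
  rw [hkeys, List.filter_map]
  have hcomp : ((fun kv : String × List String => Q kv.1) ∘ fun k => (k, (pvG ps).getD k []))
      = Q := rfl
  rw [hcomp]
  apply List.map_congr_left
  intro k hk
  have hQ : Q k = true := (List.mem_filter.mp hk).2
  rw [pvG_getD, pvG_getD, List.filter_filter]
  refine congrArg (fun l : List (String × String) => (k, List.map (fun p => p.2) l)) (List.filter_congr ?_)
  intro q _
  cases hqk : q.1 == k
  · simp
  · simp [hQ, (by simpa using hqk : q.1 = k)]

-- bucket length = name count
theorem pvBucketLen (ps : List (String × String)) (k : String) :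
    ((pvG ps).getD k []).length = List.count k (ps.map (fun p => p.1)) := by
  rw [pvG_getD, List.length_map, List.count_eq_countP, List.countP_map,
      ← List.countP_eq_length_filter]
  apply List.countP_congr
  intro q _
  simp [Function.comp, BEq.comm]

-- the name-is-duplicated test B uses
def pvQ (ps : List (String × String)) : String → Bool :=
  fun n => decide (1 < List.count n (ps.map (fun p => p.1)))

-- A computes: group everything, then keep the long buckets
theorem pvA_char (data : List String) :
    find_duplicates_by_name data
      = ((pvG (data.map pvPair)).items).filter (fun kv => decide (kv.2.length > 1)) := by
  simp only [find_duplicates_by_name]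
  have hstep : (fun (d : PySem.Dict String (List String)) (test : String) =>
      let test_data := ((PySem.Str.split? test "::").getD [])
      let test_name := PySem.List.pyGetD test_data 1 ""
      let test_path := PySem.List.pyGetD test_data 0 ""
      match d.get? test_name with
      | some v => if v.isEmpty then d.insert test_name [test_path]
                  else d.insert test_name (v ++ [test_path])
      | none => d.insert test_name [test_path])
      = fun d t => pvGStep d (pvPair t) :=
    funext fun d => funext fun t => pvStepA_eq d t
  rw [hstep, ← List.foldl_map, ← pvG]
  rw [pvItemsFilterFold ((pvG (data.map pvPair)).items) PySem.Dict.empty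
      (fun p _ => PySem.Dict.contains_empty p.1) (pvG_nodup_keys (data.map pvPair))]
  rfl

-- B computes: count names, then group only the pairs with a duplicated name
theorem pvB_char (data : List String) :
    find_duplicates_by_name_alt data
      = ((pvG (data.map pvPair)).items).filter (fun kv => pvQ (data.map pvPair) kv.1) := by
  simp only [find_duplicates_by_name_alt]
  have hstep : (fun (st : List (String × String) × PySem.Dict String Int) (test : String) =>
      let parts := ((PySem.Str.split? test "::").getD [])
      let name := PySem.List.pyGetD parts 1 ""
      let path := PySem.List.pyGetD parts 0 ""
      (st.1 ++ [(name, path)], st.2.insert name (st.2.getD name 0 + 1)))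
      = fun (st : List (String × String) × PySem.Dict String Int) t =>
          (st.1 ++ [pvPair t], st.2.insert (pvPair t).1 (st.2.getD (pvPair t).1 0 + 1)) := rfl
  have hprod := PySem.List.foldl_prod_mk (fun l (t : String) => l ++ [pvPair t])
      (fun (d : PySem.Dict String Int) t => d.insert (pvPair t).1 (d.getD (pvPair t).1 0 + 1))
      data [] PySem.Dict.empty
  beta_reduce at hprod
  rw [hstep, hprod]
  have hpairs : data.foldl (fun l t => l ++ [pvPair t]) [] = data.map pvPair := by
    simpa using PySem.List.foldl_append_singleton_eq_map pvPair data []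
  have hcount : ∀ n : String,
      (data.foldl (fun d t => d.insert (pvPair t).1 (d.getD (pvPair t).1 0 + 1))
        PySem.Dict.empty).getD n 0
      = ((List.count n ((data.map pvPair).map (fun p => p.1)) : Nat) : Int) := by
    intro n
    have hfold2 : ((data.map pvPair).map (fun p => p.1)).foldl
        (fun (d : PySem.Dict String Int) x => d.insert x (d.getD x 0 + 1)) PySem.Dict.empty
        = data.foldl (fun d t => d.insert (pvPair t).1 (d.getD (pvPair t).1 0 + 1))
            PySem.Dict.empty := by
      rw [List.map_map, List.foldl_map]; rfl
    rw [← hfold2, PySem.Dict.getD_foldl_insert_add_one, PySem.Dict.getD_empty]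
    simp
  dsimp only
  rw [hpairs, ← pvGroupFilter, pvG, List.foldl_filter]
  congr 1
  congr 1
  funext r p
  dsimp only
  rw [hcount p.1]
  have hiff : ((1 : Int) < ((List.count p.1 ((data.map pvPair).map (fun p => p.1)) : Nat) : Int))
      ↔ 1 < List.count p.1 ((data.map pvPair).map (fun p => p.1)) := by exact_mod_cast Iff.rfl
  simp only [gt_iff_lt, pvQ, pvGStep]
  by_cases h : 1 < List.count p.1 ((data.map pvPair).map (fun p => p.1))
  · rw [if_pos (hiff.mpr h), if_pos (by simpa using h)]
  · rw [if_neg (fun hc => h (hiff.mp hc)), if_neg (by simpa using h)]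

-- ===== VERDICT (by name: the statement is the Claim_ definition above) =====
theorem find_duplicates_by_name_spec : Claim_equal_find_duplicates_by_name := by
  intro data _ _
  unfold Spec_find_duplicates_by_name
  rw [pvA_char, pvB_char]
  apply List.filter_congr
  intro kv hkv
  have hv : (pvG (data.map pvPair)).getD kv.1 [] = kv.2 :=
    PySem.Dict.getD_of_mem_items _ (by simpa using hkv) (pvG_nodup_keys _) []
  have hlen : kv.2.length = List.count kv.1 ((data.map pvPair).map (fun p => p.1)) := by
    rw [← hv, pvBucketLen]
  simp only [pvQ, gt_iff_lt, hlen]
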